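-- pv_equiv track=rewrite | github.com/Gaya3priya/2nd-Year-mini-project | password_strength/strength_estimator/strength.py | calc_cardinality
-- ===== SOURCE A (Python) =====
-- def calc_cardinality(password):
--
--     lower, upper, digits, symbols = 0, 0, 0, 0
--     for char in password:
--         if char.islower():
--             lower = 26
--         elif char.isdigit():
--             digits = 10
--         elif char.isupper():
--             upper = 26
--         else:
--             symbols = 33
--     cardinality = lower + digits + upper + symbols
--
--     return cardinality
-- ===== SOURCE B (Python) =====
-- def calc_cardinality(password):
--     return (
--         (26 if any(c.islower() for c in password) else 0)
--         + (10 if any(c.isdigit() for c in password) else 0)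
--         + (26 if any(c.isupper() for c in password) else 0)
--         + (33 if any(not (c.islower() or c.isdigit() or c.isupper()) for c in password) else 0)
--     )
-- ===== Notes on version B (the rewrite author's own statement) =====
-- stated objective: simpler
-- what changed: Replaced the single stateful elif-flag loop with four independent short-circuiting any(...) presence checks, each contributing its class weight to a sum.
import Mathlib
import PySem

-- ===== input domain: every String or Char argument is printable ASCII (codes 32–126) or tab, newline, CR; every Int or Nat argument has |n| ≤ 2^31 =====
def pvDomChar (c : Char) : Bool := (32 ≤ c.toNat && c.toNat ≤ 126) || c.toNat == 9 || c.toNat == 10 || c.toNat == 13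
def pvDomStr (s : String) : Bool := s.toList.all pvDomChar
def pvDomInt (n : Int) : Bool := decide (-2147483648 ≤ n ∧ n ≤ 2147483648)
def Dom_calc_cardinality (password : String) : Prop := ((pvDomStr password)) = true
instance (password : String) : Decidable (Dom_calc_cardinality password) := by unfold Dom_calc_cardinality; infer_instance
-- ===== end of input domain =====

-- B replaces A's single stateful elif-flag loop with four independent any(...) presence checks summed (simpler decomposition, same cost).

-- ===== PORT A =====
-- the loop's state: (lower, digits, upper, symbols) flags, updated by the elif chain
def calc_cardinality_step (st : Int × Int × Int × Int) (c : Char) : Int × Int × Int × Int :=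
  if PySem.Chars.islower c then (26, st.2.1, st.2.2.1, st.2.2.2)
  else if PySem.Chars.isdigit c then (st.1, 10, st.2.2.1, st.2.2.2)
  else if PySem.Chars.isupper c then (st.1, st.2.1, 26, st.2.2.2)
  else (st.1, st.2.1, st.2.2.1, 33)

def calc_cardinality (password : String) : Int :=
  let st := password.toList.foldl calc_cardinality_step (0, 0, 0, 0)
  st.1 + st.2.1 + st.2.2.1 + st.2.2.2

-- ===== PORT B =====
def calc_cardinality_alt (password : String) : Int :=
  (if password.toList.any (fun c => PySem.Chars.islower c) then 26 else 0)
  + (if password.toList.any (fun c => PySem.Chars.isdigit c) then 10 else 0)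
  + (if password.toList.any (fun c => PySem.Chars.isupper c) then 26 else 0)
  + (if password.toList.any (fun c => !(PySem.Chars.islower c || PySem.Chars.isdigit c || PySem.Chars.isupper c)) then 33 else 0)

-- ===== PRECONDITION & SPEC =====
def Spec_calc_cardinality (password : String) (out : Int) : Prop := out = calc_cardinality_alt password
instance (password : String) (out : Int) : Decidable (Spec_calc_cardinality password out) := by unfold Spec_calc_cardinality; infer_instance

-- ===== CLAIM (what is proved, stated in full; the proofs are below) =====
def Claim_equal_calc_cardinality : Prop := ∀ (password : String), Dom_calc_cardinality password → Spec_calc_cardinality password (calc_cardinality password)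

-- ===== LEMMAS AND PROOFS =====

-- the three character classes A's elif chain distinguishes are pairwise disjoint
theorem pvCharClassDisj (c : Char) :
    (PySem.Chars.islower c = true → PySem.Chars.isdigit c = false ∧ PySem.Chars.isupper c = false)
    ∧ (PySem.Chars.isdigit c = true → PySem.Chars.isupper c = false) := by
  have h0 : 'a'.val.toNat = 97 := rfl
  have h1 : 'z'.val.toNat = 122 := rfl
  have h2 : '0'.val.toNat = 48 := rfl
  have h3 : '9'.val.toNat = 57 := rfl
  have h4 : 'A'.val.toNat = 65 := rfl
  have h5 : 'Z'.val.toNat = 90 := rfl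
  simp only [PySem.Chars.islower, PySem.Chars.isdigit, PySem.Chars.isupper,
    Bool.and_eq_true, Bool.and_eq_false_iff, decide_eq_true_eq, decide_eq_false_iff_not,
    Char.le_def, UInt32.le_iff_toNat_le, not_le, h0, h1, h2, h3, h4, h5]
  omega

-- loop invariant: starting from any flag state, the fold ends with each flag set iff
-- it was set initially or the corresponding class occurs in the remaining characters
theorem calc_cardinality_fold_char
    (l : List Char) (st : Int × Int × Int × Int) :
    l.foldl calc_cardinality_step st =
      ((if l.any (fun c => PySem.Chars.islower c) then 26 else st.1),
       (if l.any (fun c => PySem.Chars.isdigit c) then 10 else st.2.1),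
       (if l.any (fun c => PySem.Chars.isupper c) then 26 else st.2.2.1),
       (if l.any (fun c => !(PySem.Chars.islower c || PySem.Chars.isdigit c || PySem.Chars.isupper c)) then 33 else st.2.2.2)) := by
  induction l generalizing st with
  | nil => simp
  | cons c rest ih =>
    simp only [List.foldl_cons, List.any_cons, ih, calc_cardinality_step]
    rcases pvCharClassDisj c with ⟨hl, hd⟩
    by_cases h1 : PySem.Chars.islower c <;>
      by_cases h2 : PySem.Chars.isdigit c <;>
        by_cases h3 : PySem.Chars.isupper c <;>
          simp_all

-- ===== VERDICT (by name: the statement is the Claim_ definition above) =====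
theorem calc_cardinality_spec : Claim_equal_calc_cardinality := by
  intro password _
  unfold Spec_calc_cardinality calc_cardinality calc_cardinality_alt
  rw [calc_cardinality_fold_char]
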